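-- pv_equiv track=rewrite | github.com/mimirerelala/HackBulgaria | Week01/diveintopython.py | matrix_bombing_plan
-- ===== SOURCE A (Python) =====
-- def sum_matrix(m):
--     sum = 0
--     for row in m:
--         for col in row:
--             sum += col
--     return sum
--
-- def calculate_sum(m, i, j):
--     rows = len(m)
--     cols = len(m[0])
--     sum = 0
--     current_position_points = m[i][j]
--     for l in range(i-1, i+2, 1):
--         for k in range(j-1, j + 2, 1):
--             if l >= 0 and l < rows and k >= 0 and k < cols:
--                 if not (l == i and k == j):
--                     value_to_add = m[l][k] - current_position_points
--                     if value_to_add < 0: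
--                         sum += m[l][k]
--                     else:
--                         sum += current_position_points
--
--     return sum
--
-- def matrix_bombing_plan(m):
--     rows = len(m)
--     cols = len(m[0])
--     result = {}
--     for row in range(rows):
--         for col in range(cols):
--             tuple_key = (row, col)
--             result[tuple_key] = sum_matrix(m) - calculate_sum(m, row, col)
--
--     return result
-- ===== SOURCE B (Python) =====
-- def matrix_bombing_plan(m):
--     rows, cols = len(m), len(m[0])
--     total = sum(x for row in m for x in row)
--     acc = {}
--     for i in range(rows):
--         for j in range(cols):
--             for di, dj in ((0, 1), (1, -1), (1, 0), (1, 1)):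
--                 l, k = i + di, j + dj
--                 if 0 <= l < rows and 0 <= k < cols:
--                     v = min(m[i][j], m[l][k])
--                     acc[(i, j)] = acc.get((i, j), 0) + v
--                     acc[(l, k)] = acc.get((l, k), 0) + v
--     plan = {}
--     for i in range(rows):
--         for j in range(cols):
--             plan[(i, j)] = total - acc.get((i, j), 0)
--     return plan
-- ===== Notes on version B (the rewrite author's own statement) =====
-- stated objective: faster
-- what changed: B replaces A's per-cell re-summing of the whole matrix and per-cell guarded 3x3 gather by a single edge-scatter pass: the total is computed once, then each adjacent pair of cells is enumerated exactly once (4 forward directions) and min(pair) is credited to both endpoints' accumulators in a dict, from which the plan is emitted.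
import Mathlib
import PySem

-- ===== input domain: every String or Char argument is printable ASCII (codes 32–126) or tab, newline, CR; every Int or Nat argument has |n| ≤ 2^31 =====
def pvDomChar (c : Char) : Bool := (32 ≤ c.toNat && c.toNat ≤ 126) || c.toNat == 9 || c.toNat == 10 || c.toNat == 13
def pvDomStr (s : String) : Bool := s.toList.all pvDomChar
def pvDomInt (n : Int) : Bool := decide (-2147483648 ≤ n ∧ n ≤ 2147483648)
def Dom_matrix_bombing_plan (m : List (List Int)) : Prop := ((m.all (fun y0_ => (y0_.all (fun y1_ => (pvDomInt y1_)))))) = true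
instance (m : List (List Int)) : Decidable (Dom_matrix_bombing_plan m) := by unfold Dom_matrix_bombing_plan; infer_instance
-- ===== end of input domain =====

-- B hoists the whole-matrix total out of the loop and replaces A's per-cell guarded 3x3
-- gather by one edge-scatter pass (each adjacent pair enumerated once, min credited to both
-- endpoints in a dict accumulator); return values are identical on Pre_.

-- m[l][k]: inside Pre_ every access both programs perform is in range, so the default is never used
def pvGet2 (m : List (List Int)) (l k : Int) : Int :=
  PySem.List.pyGetD (PySem.List.pyGetD m l []) k 0

-- ===== PORT A =====
def pv_sum_matrix (m : List (List Int)) : Int :=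
  m.foldl (fun s row => row.foldl (fun s col => s + col) s) 0

def pv_calculate_sum (m : List (List Int)) (i j : Int) : Int :=
  let rows : Int := m.length
  let cols : Int := (PySem.List.pyGetD m 0 []).length
  let cp := pvGet2 m i j
  (PySem.List.pyRange (i - 1) (i + 2) 1).foldl (fun s l =>
    (PySem.List.pyRange (j - 1) (j + 2) 1).foldl (fun s k =>
      if 0 ≤ l ∧ l < rows ∧ 0 ≤ k ∧ k < cols then
        if ¬ (l = i ∧ k = j) then
          if pvGet2 m l k - cp < 0 then s + pvGet2 m l k else s + cp
        else s
      else s) s) 0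

def matrix_bombing_plan (m : List (List Int)) : List (Int × Int × Int) :=
  let rows : Int := m.length
  let cols : Int := (PySem.List.pyGetD m 0 []).length
  (PySem.List.pyRange 0 rows 1).foldl (fun res row =>
    (PySem.List.pyRange 0 cols 1).foldl (fun res col =>
      res ++ [(row, col, pv_sum_matrix m - pv_calculate_sum m row col)]) res) []

-- ===== PORT B =====
-- the four forward directions: each unordered adjacent pair of cells appears exactly once
def pvDirs : List (Int × Int) := [(0, 1), (1, -1), (1, 0), (1, 1)]

def matrix_bombing_plan_alt (m : List (List Int)) : List (Int × Int × Int) :=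
  let rows : Int := m.length
  let cols : Int := (PySem.List.pyGetD m 0 []).length
  let total : Int := (m.flatMap (fun row => row)).foldl (· + ·) 0
  let acc : PySem.Dict (Int × Int) Int :=
    (PySem.List.pyRange 0 rows 1).foldl (fun acc i =>
      (PySem.List.pyRange 0 cols 1).foldl (fun acc j =>
        pvDirs.foldl (fun acc d =>
          let l := i + d.1
          let k := j + d.2
          if 0 ≤ l ∧ l < rows ∧ 0 ≤ k ∧ k < cols then
            let v := min (pvGet2 m i j) (pvGet2 m l k)
            let acc := acc.insert (i, j) (acc.getD (i, j) 0 + v)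
            acc.insert (l, k) (acc.getD (l, k) 0 + v)
          else acc) acc) acc) PySem.Dict.empty
  (PySem.List.pyRange 0 rows 1).foldl (fun plan i =>
    (PySem.List.pyRange 0 cols 1).foldl (fun plan j =>
      plan ++ [(i, j, total - acc.getD (i, j) 0)]) plan) []

-- ===== PRECONDITION & SPEC =====
-- Pre_ excludes exactly the inputs where the Python raises IndexError: the empty matrix
-- (A reads m[0]) and ragged matrices with a row shorter than row 0 (A reads m[l][k] for k < len(m[0])).
def Pre_matrix_bombing_plan (m : List (List Int)) : Prop :=
  m ≠ [] ∧ ∀ row ∈ m, (PySem.List.pyGetD m 0 []).length ≤ row.length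
instance (m : List (List Int)) : Decidable (Pre_matrix_bombing_plan m) := by
  unfold Pre_matrix_bombing_plan; infer_instance

def pvWitness_matrix_bombing_plan : List (List Int) := [[1, 2], [3, 4]]

def Spec_matrix_bombing_plan (m : List (List Int)) (out : List (Int × Int × Int)) : Prop := out = matrix_bombing_plan_alt m
instance (m : List (List Int)) (out : List (Int × Int × Int)) : Decidable (Spec_matrix_bombing_plan m out) := by unfold Spec_matrix_bombing_plan; infer_instance

-- ===== CLAIM (what is proved, stated in full; the proofs are below) =====
def Claim_equal_matrix_bombing_plan : Prop := ∀ (m : List (List Int)), Dom_matrix_bombing_plan m → Pre_matrix_bombing_plan m → Spec_matrix_bombing_plan m (matrix_bombing_plan m)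

-- ===== LEMMAS AND PROOFS =====

-- the common normal form of the neighbourhood value at (i, j): one guarded min per offset
def pvT (m : List (List Int)) (rows cols i j l k : Int) : Int :=
  if 0 ≤ l ∧ l < rows ∧ 0 ≤ k ∧ k < cols then min (pvGet2 m l k) (pvGet2 m i j) else 0

def pvS8 (m : List (List Int)) (rows cols i j : Int) : Int :=
  pvT m rows cols i j (i - 1) (j - 1) + pvT m rows cols i j (i - 1) j +
  pvT m rows cols i j (i - 1) (j + 1) + pvT m rows cols i j i (j - 1) +
  pvT m rows cols i j i (j + 1) + pvT m rows cols i j (i + 1) (j - 1) +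
  pvT m rows cols i j (i + 1) j + pvT m rows cols i j (i + 1) (j + 1)

-- A's guarded 3x3 summand
def pvE (m : List (List Int)) (rows cols i j l k : Int) : Int :=
  if (0 ≤ l ∧ l < rows ∧ 0 ≤ k ∧ k < cols) ∧ ¬ (l = i ∧ k = j)
  then min (pvGet2 m l k) (pvGet2 m i j) else 0

lemma pvRange3 (i : Int) : PySem.List.pyRange (i - 1) (i + 2) 1 = [i - 1, i, i + 1] := by
  rw [PySem.List.pyRange_one_cons (by omega), show i - 1 + 1 = i by ring,
      PySem.List.pyRange_one_cons (by omega),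
      PySem.List.pyRange_one_cons (by omega),
      PySem.List.pyRange_one_eq_nil (by omega)]

-- A's calculate_sum equals the 8-term normal form
lemma pv_calc_eq (m : List (List Int)) (i j : Int) :
    pv_calculate_sum m i j = pvS8 m (m.length : Int) ((PySem.List.pyGetD m 0 []).length : Int) i j := by
  unfold pv_calculate_sum
  simp only []
  set rows : Int := (m.length : Int) with hrows
  set cols : Int := ((PySem.List.pyGetD m 0 []).length : Int) with hcols
  have hbody : ∀ (l s k : Int),
      (if 0 ≤ l ∧ l < rows ∧ 0 ≤ k ∧ k < cols then
        if ¬ (l = i ∧ k = j) then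
          if pvGet2 m l k - pvGet2 m i j < 0 then s + pvGet2 m l k else s + pvGet2 m i j
        else s
      else s) = s + pvE m rows cols i j l k := by
    intro l s k
    unfold pvE
    by_cases h1 : 0 ≤ l ∧ l < rows ∧ 0 ≤ k ∧ k < cols
    · by_cases h2 : l = i ∧ k = j
      · simp [h2]
      · rw [if_pos h1, if_pos h2,
          if_pos (show (0 ≤ l ∧ l < rows ∧ 0 ≤ k ∧ k < cols) ∧ ¬ (l = i ∧ k = j) from ⟨h1, h2⟩)]
        rcases lt_trichotomy (pvGet2 m l k) (pvGet2 m i j) with h | h | h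
        · rw [if_pos (by omega), min_eq_left (le_of_lt h)]
        · rw [if_neg (by omega), h, min_self]
        · rw [if_neg (by omega), min_eq_right (le_of_lt h)]
    · rw [if_neg h1, if_neg (by tauto)]
      ring
  have hinner : ∀ (s l : Int),
      (PySem.List.pyRange (j - 1) (j + 2) 1).foldl (fun s k =>
        if 0 ≤ l ∧ l < rows ∧ 0 ≤ k ∧ k < cols then
          if ¬ (l = i ∧ k = j) then
            if pvGet2 m l k - pvGet2 m i j < 0 then s + pvGet2 m l k else s + pvGet2 m i j
          else s
        else s) s
      = s + ((PySem.List.pyRange (j - 1) (j + 2) 1).map (pvE m rows cols i j l)).sum := by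
    intro s l
    rw [PySem.List.foldl_congr_mem _ _ (fun s k => s + pvE m rows cols i j l k) s
        (fun acc k _ => hbody l acc k)]
    exact PySem.List.foldl_add _ _ s
  rw [PySem.List.foldl_congr_mem _ _ (fun s l =>
        s + ((PySem.List.pyRange (j - 1) (j + 2) 1).map (pvE m rows cols i j l)).sum) 0
        (fun acc l _ => hinner acc l)]
  rw [PySem.List.foldl_add _ _ 0, pvRange3 i, pvRange3 j]
  have hc : pvE m rows cols i j i j = 0 := by
    unfold pvE
    rw [if_neg (by tauto)]
  have hne : ∀ l k : Int, ¬ (l = i ∧ k = j) →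
      pvE m rows cols i j l k = pvT m rows cols i j l k := by
    intro l k h
    unfold pvE pvT
    simp [h]
  simp only [List.map_cons, List.map_nil, List.sum_cons, List.sum_nil]
  rw [hc, hne (i - 1) (j - 1) (by omega), hne (i - 1) j (by omega),
    hne (i - 1) (j + 1) (by omega), hne i (j - 1) (by omega), hne i (j + 1) (by omega),
    hne (i + 1) (j - 1) (by omega), hne (i + 1) j (by omega), hne (i + 1) (j + 1) (by omega)]
  unfold pvS8
  ring

-- A's total, re-summed per cell, equals B's hoisted total
lemma pv_total_eq (m : List (List Int)) :
    pv_sum_matrix m = (m.flatMap (fun row => row)).foldl (· + ·) 0 := by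
  have h1 : ∀ (L : List (List Int)) (s : Int),
      L.foldl (fun s row => row.foldl (fun s col => s + col) s) s
        = s + (L.flatMap (fun row => row)).sum := by
    intro L
    induction L with
    | nil => intro s; simp
    | cons r t ih =>
      intro s
      simp only [List.foldl_cons, List.flatMap_cons, List.sum_append, ih,
        PySem.List.foldl_add r (fun x => x) s]
      simp [add_assoc]
  have h2 : (m.flatMap (fun row => row)).foldl (· + ·) 0
      = 0 + ((m.flatMap (fun row => row)).map (fun x => x)).sum :=
    PySem.List.foldl_add _ (fun x => x) 0
  unfold pv_sum_matrix
  rw [h1, h2]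
  simp

-- ---- B side: scatter machinery ----
def pvStep (d : PySem.Dict (Int × Int) Int) (u : (Int × Int) × Int) : PySem.Dict (Int × Int) Int :=
  d.insert u.1 (d.getD u.1 0 + u.2)

def pvUpd (m : List (List Int)) (rows cols i j : Int) (d : Int × Int) : List ((Int × Int) × Int) :=
  if 0 ≤ i + d.1 ∧ i + d.1 < rows ∧ 0 ≤ j + d.2 ∧ j + d.2 < cols then
    [((i, j), min (pvGet2 m i j) (pvGet2 m (i + d.1) (j + d.2))),
     ((i + d.1, j + d.2), min (pvGet2 m i j) (pvGet2 m (i + d.1) (j + d.2)))]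
  else []

lemma pv_foldl_flat {α γ : Type} {β : Type} (g : β → γ → β) (f : α → List γ) :
    ∀ (L : List α) (b : β),
      L.foldl (fun b a => (f a).foldl g b) b = (L.flatMap f).foldl g b := by
  intro L
  induction L with
  | nil => intro b; rfl
  | cons x xs ih => intro b; simp [List.foldl, List.flatMap_cons, List.foldl_append, ih]

lemma pv_getD_scatter :
    ∀ (us : List ((Int × Int) × Int)) (d : PySem.Dict (Int × Int) Int) (key : Int × Int),
      (us.foldl pvStep d).getD key 0
        = d.getD key 0 + (us.map (fun u => if u.1 = key then u.2 else 0)).sum := by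
  intro us
  induction us with
  | nil => intro d key; simp
  | cons u t ih =>
    intro d key
    simp only [List.foldl_cons, List.map_cons, List.sum_cons, ih]
    unfold pvStep
    rw [PySem.Dict.getD_insert]
    by_cases h : key = u.1
    · subst h; simp; ring
    · rw [if_neg h, if_neg (fun hh => h hh.symm)]; ring

-- 1D point-mass sum over a range
lemma pvPM1 (f : Int → Int) (t : Int) :
    ∀ (n : Nat) (a b : Int), (b - a).toNat = n →
      ((PySem.List.pyRange a b 1).map (fun x => if x = t then f x else 0)).sum
        = if a ≤ t ∧ t < b then f t else 0 := by
  intro n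
  induction n with
  | zero =>
    intro a b h
    rw [PySem.List.pyRange_one_eq_nil (by omega), if_neg (by omega)]
    rfl
  | succ n ih =>
    intro a b h
    rw [PySem.List.pyRange_one_cons (by omega), List.map_cons, List.sum_cons,
      ih (a + 1) b (by omega)]
    by_cases ha : a = t
    · subst ha
      rw [if_pos rfl, if_neg (by omega), if_pos (by omega)]
      ring
    · rw [if_neg ha]
      by_cases hc : a + 1 ≤ t ∧ t < b
      · rw [if_pos hc, if_pos (by omega)]; ring
      · rw [if_neg hc, if_neg (by omega)]; ring

-- 2D point-mass sum over the grid
lemma pvPM2 (rows cols p q : Int) (w : Int → Int → Int) :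
    ((PySem.List.pyRange 0 rows 1).map (fun r =>
       ((PySem.List.pyRange 0 cols 1).map (fun c =>
          if r = p ∧ c = q then w r c else 0)).sum)).sum
      = if (0 ≤ p ∧ p < rows) ∧ (0 ≤ q ∧ q < cols) then w p q else 0 := by
  have hin : ∀ r : Int,
      ((PySem.List.pyRange 0 cols 1).map (fun c => if r = p ∧ c = q then w r c else 0)).sum
        = if r = p then (if 0 ≤ q ∧ q < cols then w r q else 0) else 0 := by
    intro r
    have : ∀ c : Int, (if r = p ∧ c = q then w r c else 0)
        = if c = q then (if r = p then w r c else 0) else 0 := by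
      intro c; split_ifs <;> tauto
    simp only [this]
    rw [pvPM1 (fun c => if r = p then w r c else 0) q (cols - 0).toNat 0 cols rfl]
    split_ifs <;> tauto
  simp only [hin]
  have : ∀ r : Int, (if r = p then (if 0 ≤ q ∧ q < cols then w r q else 0) else 0)
      = if r = p then (fun x => if 0 ≤ q ∧ q < cols then w x q else 0) r else 0 := by
    intro r; rfl
  simp only [this]
  rw [pvPM1 (fun x => if 0 ≤ q ∧ q < cols then w x q else 0) p (rows - 0).toNat 0 rows rfl]
  split_ifs <;> tauto

lemma pv_sum_map_flatMap {α β : Type} (L : List α) (f : α → List β) (g : β → Int) :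
    ((L.flatMap f).map g).sum = (L.map (fun a => ((f a).map g).sum)).sum := by
  induction L with
  | nil => rfl
  | cons x t ih => simp [List.flatMap_cons, List.map_append, List.sum_append, ih]

lemma pv_upd_sum (m : List (List Int)) (rows cols r c : Int) (key : Int × Int) (d : Int × Int) :
    ((pvUpd m rows cols r c d).map (fun u => if u.1 = key then u.2 else 0)).sum
      = (if r = key.1 ∧ c = key.2 then
           (if 0 ≤ r + d.1 ∧ r + d.1 < rows ∧ 0 ≤ c + d.2 ∧ c + d.2 < cols then
              min (pvGet2 m r c) (pvGet2 m (r + d.1) (c + d.2)) else 0) else 0)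
      + (if r = key.1 - d.1 ∧ c = key.2 - d.2 then
           (if 0 ≤ r + d.1 ∧ r + d.1 < rows ∧ 0 ≤ c + d.2 ∧ c + d.2 < cols then
              min (pvGet2 m r c) (pvGet2 m (r + d.1) (c + d.2)) else 0) else 0) := by
  unfold pvUpd
  by_cases hg : 0 ≤ r + d.1 ∧ r + d.1 < rows ∧ 0 ≤ c + d.2 ∧ c + d.2 < cols
  · rw [if_pos hg]
    simp only [List.map_cons, List.map_nil, List.sum_cons, List.sum_nil, add_zero, if_pos hg]
    have e1 : ((r, c) = key) ↔ (r = key.1 ∧ c = key.2) := by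
      rw [Prod.ext_iff]
    have e2 : ((r + d.1, c + d.2) = key) ↔ (r = key.1 - d.1 ∧ c = key.2 - d.2) := by
      rw [Prod.ext_iff]
      constructor
      · rintro ⟨h1, h2⟩; exact ⟨by simp at h1; omega, by simp at h2; omega⟩
      · rintro ⟨h1, h2⟩; exact ⟨by simp; omega, by simp; omega⟩
    rw [if_congr e1 rfl rfl, if_congr e2 rfl rfl]
  · rw [if_neg hg]
    simp only [List.map_nil, List.sum_nil, if_neg hg]
    split_ifs <;> simp

-- B's accumulator holds exactly the 8-term normal form at every in-range key
lemma pv_acc_eq (m : List (List Int)) (rows cols i j : Int)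
    (hi : 0 ≤ i ∧ i < rows) (hj : 0 ≤ j ∧ j < cols) :
    (((PySem.List.pyRange 0 rows 1).flatMap (fun r =>
        (PySem.List.pyRange 0 cols 1).flatMap (fun c =>
          pvDirs.flatMap (pvUpd m rows cols r c)))).foldl pvStep PySem.Dict.empty).getD (i, j) 0
      = pvS8 m rows cols i j := by
  rw [pv_getD_scatter, PySem.Dict.getD_empty, zero_add]
  simp only [pv_sum_map_flatMap, pv_upd_sum]
  simp only [pvDirs, List.map_cons, List.map_nil, List.sum_cons, List.sum_nil, add_zero]
  simp only [PySem.List.sum_map_add_int]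
  simp only [pvPM2]
  simp only [sub_zero, sub_add_cancel, sub_neg_eq_add, ← sub_eq_add_neg, add_sub_cancel_right]
  unfold pvS8 pvT
  simp only [hi.1, hi.2, hj.1, hj.2, and_assoc, and_true, true_and, if_true]
  rw [min_comm (pvGet2 m i j) (pvGet2 m i (j + 1)),
    min_comm (pvGet2 m i j) (pvGet2 m (i + 1) (j - 1)),
    min_comm (pvGet2 m i j) (pvGet2 m (i + 1) j),
    min_comm (pvGet2 m i j) (pvGet2 m (i + 1) (j + 1))]
  ring

-- the nested scatter loop of port B is the flat fold over the update list
lemma pv_scatter_flat (m : List (List Int)) (rows cols : Int) :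
    (PySem.List.pyRange 0 rows 1).foldl (fun acc i =>
      (PySem.List.pyRange 0 cols 1).foldl (fun acc j =>
        pvDirs.foldl (fun acc d =>
          let l := i + d.1
          let k := j + d.2
          if 0 ≤ l ∧ l < rows ∧ 0 ≤ k ∧ k < cols then
            let v := min (pvGet2 m i j) (pvGet2 m l k)
            let acc := acc.insert (i, j) (acc.getD (i, j) 0 + v)
            acc.insert (l, k) (acc.getD (l, k) 0 + v)
          else acc) acc) acc) PySem.Dict.empty
    = ((PySem.List.pyRange 0 rows 1).flatMap (fun r =>
        (PySem.List.pyRange 0 cols 1).flatMap (fun c =>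
          pvDirs.flatMap (pvUpd m rows cols r c)))).foldl pvStep PySem.Dict.empty := by
  rw [← pv_foldl_flat]
  apply PySem.List.foldl_congr_mem
  intro acc i _
  rw [← pv_foldl_flat]
  apply PySem.List.foldl_congr_mem
  intro acc' j _
  rw [← pv_foldl_flat]
  apply PySem.List.foldl_congr_mem
  intro acc'' d _
  unfold pvUpd pvStep
  by_cases hg : 0 ≤ i + d.1 ∧ i + d.1 < rows ∧ 0 ≤ j + d.2 ∧ j + d.2 < cols
  · rw [if_pos hg, if_pos hg]; rfl
  · rw [if_neg hg, if_neg hg]; rfl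

-- ===== VERDICT (by name: the statement is the Claim_ definition above) =====
theorem matrix_bombing_plan_spec : Claim_equal_matrix_bombing_plan := by
  intro m _ _
  unfold Spec_matrix_bombing_plan matrix_bombing_plan matrix_bombing_plan_alt
  simp only []
  rw [pv_scatter_flat]
  apply PySem.List.foldl_congr_mem
  intro acc i hi
  apply PySem.List.foldl_congr_mem
  intro acc' j hj
  rw [PySem.List.mem_pyRange_one] at hi hj
  rw [pv_total_eq, pv_calc_eq, pv_acc_eq m _ _ i j hi hj]
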